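-- pv_equiv track=rewrite | github.com/into-the-mehtaverse/dealq-showcase | backend/app/services/underwriting/structuring/t12_utils.py | match_categories_with_amounts
-- ===== SOURCE A (Python) =====
-- from typing import List, Dict, Any
--
-- def match_categories_with_amounts(line_items_and_amounts: List[List], line_items_and_categories: List[List]) -> List[List]:
--     """
--     Deterministically match categories with amounts from previous extraction step.
--
--     Args:
--         line_items_and_amounts: List of [line_item, amount] arrays from extraction
--         line_items_and_categories: List of [line_item, category] arrays from categorization
--
--     Returns:
--         List of [line_item, amount, category] arrays
--     """
--     # Create lookup dictionary from line_items_and_categories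
--     category_lookup = {}
--     for item in line_items_and_categories:
--         if len(item) >= 2:
--             line_item = item[0]
--             category = item[1]
--             category_lookup[line_item] = category
--
--     # Match each item from line_items_and_amounts with its category
--     result = []
--     for item in line_items_and_amounts:
--         if len(item) >= 2:
--             line_item = item[0]
--             amount = item[1]
--             category = category_lookup.get(line_item, "Unknown")
--             result.append([line_item, amount, category])
--
--     return result
-- ===== SOURCE B (Python) =====
-- def match_categories_with_amounts(line_items_and_amounts, line_items_and_categories):
--     # Stage 1: emit all output rows with an "Unknown" placeholder category.
--     result = [[item[0], item[1], "Unknown"]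
--               for item in line_items_and_amounts if len(item) >= 2]
--     # Stage 2: apply each category row as an in-place update to every matching
--     # output row; later category rows overwrite earlier ones (last write wins,
--     # exactly like A's dict).
--     for cat in line_items_and_categories:
--         if len(cat) >= 2:
--             for row in result:
--                 if row[0] == cat[0]:
--                     row[2] = cat[1]
--     return result
-- ===== Notes on version B (the rewrite author's own statement) =====
-- stated objective: alternative
-- what changed: Inverted the data flow: B first emits all output rows with an 'Unknown' placeholder, then iterates over the category rows as the OUTER loop, patching the category cell of every matching output row in place (later category rows overwrite earlier ones, matching the dict's last-write); no lookup structure is built.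
import Mathlib
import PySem

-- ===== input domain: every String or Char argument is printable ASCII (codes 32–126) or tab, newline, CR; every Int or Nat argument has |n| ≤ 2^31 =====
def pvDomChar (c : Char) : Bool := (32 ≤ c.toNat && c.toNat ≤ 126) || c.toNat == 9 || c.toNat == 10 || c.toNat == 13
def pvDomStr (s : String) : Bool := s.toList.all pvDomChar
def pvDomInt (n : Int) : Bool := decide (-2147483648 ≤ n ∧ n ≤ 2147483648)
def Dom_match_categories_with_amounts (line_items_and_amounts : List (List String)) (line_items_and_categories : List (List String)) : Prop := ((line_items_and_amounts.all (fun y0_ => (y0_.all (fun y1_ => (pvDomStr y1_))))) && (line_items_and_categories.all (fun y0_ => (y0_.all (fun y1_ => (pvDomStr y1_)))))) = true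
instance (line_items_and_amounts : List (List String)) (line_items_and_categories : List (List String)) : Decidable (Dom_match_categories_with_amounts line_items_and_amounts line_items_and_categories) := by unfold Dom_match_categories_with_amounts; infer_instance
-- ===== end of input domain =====

-- B inverts A's data flow: it first emits all output rows with an "Unknown" placeholder,
-- then loops over the category rows (outer loop) patching every matching output row in
-- place, so no lookup dict is built; objective: alternative (no speed claim).
-- B mutates its own intermediate rows only; neither program mutates its arguments.

-- ===== PORT A =====
def match_categories_with_amounts (line_items_and_amounts : List (List String)) (line_items_and_categories : List (List String)) : List (List String) :=
  -- category_lookup = {}; for item in line_items_and_categories: if len(item) >= 2: lookup[item[0]] = item[1]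
  let category_lookup : PySem.Dict String String :=
    line_items_and_categories.foldl
      (fun d item =>
        if 2 ≤ item.length then d.insert (item.getD 0 "") (item.getD 1 "") else d)
      PySem.Dict.empty
  -- result = []; for item in line_items_and_amounts: if len(item) >= 2: append [item[0], item[1], lookup.get(item[0], "Unknown")]
  line_items_and_amounts.foldl
    (fun res item =>
      if 2 ≤ item.length then
        res ++ [[item.getD 0 "", item.getD 1 "", category_lookup.getD (item.getD 0 "") "Unknown"]]
      else res)
    []

-- ===== PORT B =====
def match_categories_with_amounts_alt (line_items_and_amounts : List (List String)) (line_items_and_categories : List (List String)) : List (List String) :=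
  -- result = [[item[0], item[1], "Unknown"] for item in line_items_and_amounts if len(item) >= 2]
  let result :=
    line_items_and_amounts.filterMap
      (fun item =>
        if 2 ≤ item.length then some [item.getD 0 "", item.getD 1 "", "Unknown"] else none)
  -- for cat in cats: if len(cat) >= 2: for row in result: if row[0] == cat[0]: row[2] = cat[1]
  -- (the in-place row[2] assignment is ported as List.set 2 on the 3-element row)
  line_items_and_categories.foldl
    (fun rows cat =>
      if 2 ≤ cat.length then
        rows.map (fun row => if row.getD 0 "" = cat.getD 0 "" then row.set 2 (cat.getD 1 "") else row)
      else rows)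
    result

-- ===== PRECONDITION & SPEC =====
def Spec_match_categories_with_amounts (line_items_and_amounts : List (List String)) (line_items_and_categories : List (List String)) (out : List (List String)) : Prop := out = match_categories_with_amounts_alt line_items_and_amounts line_items_and_categories
instance (line_items_and_amounts : List (List String)) (line_items_and_categories : List (List String)) (out : List (List String)) : Decidable (Spec_match_categories_with_amounts line_items_and_amounts line_items_and_categories out) := by unfold Spec_match_categories_with_amounts; infer_instance

-- ===== CLAIM (what is proved, stated in full; the proofs are below) =====
def Claim_equal_match_categories_with_amounts : Prop := ∀ (line_items_and_amounts : List (List String)) (line_items_and_categories : List (List String)), Dom_match_categories_with_amounts line_items_and_amounts line_items_and_categories → Spec_match_categories_with_amounts line_items_and_amounts line_items_and_categories (match_categories_with_amounts line_items_and_amounts line_items_and_categories)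

-- ===== LEMMAS AND PROOFS =====

-- Folding the category updates over a list of rows = per-row folding (the outer/inner
-- loop nesting of B commutes because each update acts row-wise).
theorem pv_fold_map (cats : List (List String)) (rows : List (List String)) :
    cats.foldl
      (fun rows cat =>
        if 2 ≤ cat.length then
          rows.map (fun row => if row.getD 0 "" = cat.getD 0 "" then row.set 2 (cat.getD 1 "") else row)
        else rows) rows
    = rows.map (fun row =>
        cats.foldl
          (fun row cat =>
            if 2 ≤ cat.length then
              (if row.getD 0 "" = cat.getD 0 "" then row.set 2 (cat.getD 1 "") else row)
            else row) row) := by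
  induction cats generalizing rows with
  | nil => simp
  | cons cat rest ih =>
    simp only [List.foldl_cons]
    by_cases h : 2 ≤ cat.length
    · rw [if_pos h, ih, List.map_map]
      apply List.map_congr_left
      intro row _
      simp [h]
    · rw [if_neg h, ih]
      apply List.map_congr_left
      intro row _
      simp [h]

-- B's per-row update fold on a concrete 3-element row [li, am, c] keeps li and am and
-- ends with the last matching category (or c if none matches).
theorem pv_row_fold (cats : List (List String)) (li am c : String) :
    cats.foldl
      (fun row cat =>
        if 2 ≤ cat.length then
          (if row.getD 0 "" = cat.getD 0 "" then row.set 2 (cat.getD 1 "") else row)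
        else row) [li, am, c]
    = [li, am,
       cats.foldl
         (fun c cat => if 2 ≤ cat.length ∧ cat.getD 0 "" = li then cat.getD 1 "" else c) c] := by
  induction cats generalizing c with
  | nil => rfl
  | cons cat rest ih =>
    simp only [List.foldl_cons]
    rw [show ([li, am, c].getD 0 "") = li from rfl]
    by_cases h : 2 ≤ cat.length
    · by_cases hk : cat.getD 0 "" = li
      · rw [if_pos h, if_pos hk.symm, if_pos ⟨h, hk⟩]
        simpa [List.set] using ih (cat.getD 1 "")
      · rw [if_pos h, if_neg (fun e => hk e.symm), if_neg (fun e => hk e.2)]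
        exact ih c
    · rw [if_neg h, if_neg (fun e => h e.1)]
      exact ih c

-- The dict built by A's first loop, looked up at key k with default dflt, equals the
-- last-match scan over the same rows started from d.getD k dflt.
theorem pv_lookup_eq (cats : List (List String)) (d : PySem.Dict String String) (k dflt : String) :
    (cats.foldl
      (fun d item =>
        if 2 ≤ item.length then d.insert (item.getD 0 "") (item.getD 1 "") else d) d).getD k dflt
    = cats.foldl
        (fun c cat_item =>
          if 2 ≤ cat_item.length ∧ cat_item.getD 0 "" = k then cat_item.getD 1 "" else c)
        (d.getD k dflt) := by
  induction cats generalizing d with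
  | nil => rfl
  | cons item rest ih =>
    simp only [List.foldl_cons]
    by_cases h : 2 ≤ item.length
    · rw [if_pos h, ih]
      congr 1
      rw [PySem.Dict.getD_insert]
      by_cases hk : item.getD 0 "" = k
      · rw [if_pos hk.symm, if_pos ⟨h, hk⟩]
      · rw [if_neg (fun e => hk e.symm), if_neg (fun e => hk e.2)]
    · rw [if_neg h, if_neg (fun e => h e.1)]
      exact ih d

-- A's append-accumulating loop over the amount rows is the filterMap of its body.
theorem pv_foldl_filterMap (amts : List (List String)) (acc : List (List String))
    (f : List String → List String) :
    amts.foldl (fun res item => if 2 ≤ item.length then res ++ [f item] else res) acc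
    = acc ++ amts.filterMap (fun item => if 2 ≤ item.length then some (f item) else none) := by
  induction amts generalizing acc with
  | nil => simp
  | cons item rest ih =>
    simp only [List.foldl_cons, List.filterMap_cons]
    by_cases h : 2 ≤ item.length
    · rw [if_pos h, if_pos h, ih]; simp
    · rw [if_neg h, if_neg h, ih]

-- ===== VERDICT (by name: the statement is the Claim_ definition above) =====
theorem match_categories_with_amounts_spec : Claim_equal_match_categories_with_amounts := by
  intro amts cats _
  unfold Spec_match_categories_with_amounts match_categories_with_amounts match_categories_with_amounts_alt
  rw [pv_fold_map, List.map_filterMap, pv_foldl_filterMap, List.nil_append]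
  apply List.filterMap_congr
  intro item _
  by_cases h : 2 ≤ item.length
  · rw [if_pos h, if_pos h, Option.map_some, pv_row_fold,
      pv_lookup_eq cats PySem.Dict.empty (item.getD 0 "") "Unknown", PySem.Dict.getD_empty]
  · rw [if_neg h, if_neg h]; rfl
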